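-- pv_equiv track=rewrite | github.com/graspologic-org/graspologic | graspologic/layouts/_helpers.py | create_colormap
-- ===== SOURCE A (Python) =====
-- from collections import defaultdict
--
-- def create_colormap(color_list, id_community):
--     community_size = defaultdict(int)
--     for comm in id_community.values():
--         community_size[comm] += 1
--     colormap = {}
--     next_comm = 0
--     color_list_size = len(color_list)
--     # we wrap around if there are more communities than colors
--     for community in sorted(
--         community_size, reverse=True, key=lambda x: community_size[x]
--     ):
--         colormap[community] = color_list[next_comm % color_list_size]
--         next_comm += 1
--     return colormap
-- ===== SOURCE B (Python) =====
-- from collections import Counter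
--
-- def create_colormap(color_list, id_community):
--     counts = Counter(id_community.values())
--     # selection scan: for each possible size, descending, pick the communities
--     # of exactly that size in first-occurrence order (stable, no comparison sort)
--     ordered = [c for size in range(len(id_community), 0, -1)
--                  for c in counts if counts[c] == size]
--     n = len(color_list)
--     return {c: color_list[i % n] for i, c in enumerate(ordered)}
-- ===== Notes on version B (the rewrite author's own statement) =====
-- stated objective: alternative
-- what changed: Replaces sorted(communities, reverse=True, key=size) plus an incrementing insert loop by a selection scan (for each size from len(id_community) down to 1, pick the communities of exactly that size in first-occurrence order) followed by an enumerate-based dict comprehension that pairs each community with its color.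
import Mathlib
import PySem

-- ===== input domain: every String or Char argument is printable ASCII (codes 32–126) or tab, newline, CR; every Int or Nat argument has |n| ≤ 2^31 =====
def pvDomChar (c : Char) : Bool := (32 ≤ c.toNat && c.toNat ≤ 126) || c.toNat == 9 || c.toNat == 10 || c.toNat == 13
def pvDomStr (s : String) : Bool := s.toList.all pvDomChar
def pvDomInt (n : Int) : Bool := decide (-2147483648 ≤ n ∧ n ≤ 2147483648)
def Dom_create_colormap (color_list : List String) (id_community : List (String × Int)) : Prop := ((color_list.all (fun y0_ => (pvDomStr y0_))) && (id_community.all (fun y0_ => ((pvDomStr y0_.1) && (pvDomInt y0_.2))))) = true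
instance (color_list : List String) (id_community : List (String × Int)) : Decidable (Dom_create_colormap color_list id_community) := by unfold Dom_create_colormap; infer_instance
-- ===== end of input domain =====

-- B replaces the comparison sort + incrementing insert loop by a selection scan over sizes
-- (descending) followed by an enumerate-based dict comprehension; objective: alternative.

-- ===== PORT A =====
def create_colormap (color_list : List String) (id_community : List (String × Int)) : List (Int × String) :=
  let vals := (PySem.Dict.ofList id_community).values
  let community_size := vals.foldl (fun d c => d.modify c 0 (· + 1)) (PySem.Dict.empty : PySem.Dict Int Int)
  let color_list_size : Int := (color_list.length : Int)
  -- sorted(community_size, reverse=True, key=lambda x: community_size[x]); keys are present, so [] = getD _ 0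
  let comms := PySem.List.sorted community_size.keys (fun x => community_size.getD x 0) true
  let res := comms.foldl
    (fun (st : PySem.Dict Int String × Int) c =>
      (st.1.insert c ((PySem.List.pyGet? color_list (PySem.Int.mod st.2 color_list_size)).getD ""), st.2 + 1))
    ((PySem.Dict.empty : PySem.Dict Int String), (0 : Int))
  res.1.items

-- ===== PORT B =====
def create_colormap_alt (color_list : List String) (id_community : List (String × Int)) : List (Int × String) :=
  let counts := PySem.Dict.counter (PySem.Dict.ofList id_community).values
  -- ordered = [c for size in range(len(id_community), 0, -1) for c in counts if counts[c] == size]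
  let ordered := (PySem.List.pyRange ((PySem.Dict.ofList id_community).size : Int) 0 (-1)).flatMap
    (fun s => counts.keys.filter (fun c => counts.getD c 0 == s))
  let n : Int := (color_list.length : Int)
  -- {c: color_list[i % n] for i, c in enumerate(ordered)}
  (PySem.Dict.ofList ((PySem.List.enumerate ordered 0).map
    (fun p => (p.2, (PySem.List.pyGet? color_list (PySem.Int.mod p.1 n)).getD "")))).items

-- ===== PRECONDITION & SPEC =====
-- Pre_ excludes only inputs where Python A raises: empty color_list with a nonempty
-- community dict makes `next_comm % color_list_size` a ZeroDivisionError (B raises there too).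
def Pre_create_colormap (color_list : List String) (id_community : List (String × Int)) : Prop :=
  color_list ≠ [] ∨ id_community = []
instance (color_list : List String) (id_community : List (String × Int)) : Decidable (Pre_create_colormap color_list id_community) := by unfold Pre_create_colormap; infer_instance

def pvWitness_create_colormap : List String × (List (String × Int)) :=
  (["red", "blue"], [("a", 1), ("b", 2), ("c", 2)])

def Spec_create_colormap (color_list : List String) (id_community : List (String × Int)) (out : List (Int × String)) : Prop := out = create_colormap_alt color_list id_community
instance (color_list : List String) (id_community : List (String × Int)) (out : List (Int × String)) : Decidable (Spec_create_colormap color_list id_community out) := by unfold Spec_create_colormap; infer_instance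

-- ===== CLAIM (what is proved, stated in full; the proofs are below) =====
def Claim_equal_create_colormap : Prop := ∀ (color_list : List String) (id_community : List (String × Int)), Dom_create_colormap color_list id_community → Pre_create_colormap color_list id_community → Spec_create_colormap color_list id_community (create_colormap color_list id_community)

-- ===== LEMMAS AND PROOFS =====

def pvDesc : Nat → List Int
  | 0 => []
  | n + 1 => ((n : Int) + 1) :: pvDesc n

theorem pyRange_desc (n : Nat) : PySem.List.pyRange (n : Int) 0 (-1) = pvDesc n := by
  have h1 : PySem.List.pyRange (n : Int) 0 (-1) = (List.range n).map (fun k : Nat => (n : Int) + (-1) * (k : Int)) := by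
    cases n with
    | zero => simp [PySem.List.pyRange]
    | succ m =>
      show (if (-1 : Int) = 0 then [] else _) = _
      rw [if_neg (by norm_num)]
      have hc : (if (0:Int) < -1 then if ((m+1:Nat) : Int) < 0 then (((0:Int) - ((m+1:Nat):Int) + -1 - 1) / -1).toNat else 0
          else if (0:Int) < ((m+1:Nat):Int) then ((((m+1:Nat):Int) - 0 + -(-1) - 1) / -(-1)).toNat else 0) = m + 1 := by
        rw [if_neg (by norm_num), if_pos (by positivity)]
        push_cast; omega
      rw [hc]
  rw [h1]; clear h1
  induction n with
  | zero => simp [pvDesc]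
  | succ m ih =>
    rw [List.range_succ_eq_map, List.map_cons, List.map_map]
    have h2 : ((fun k : Nat => ((m+1 : Nat) : Int) + (-1) * (k : Int)) ∘ Nat.succ)
        = (fun k : Nat => (m : Int) + (-1) * (k : Int)) := by
      funext k
      show ((m+1 : Nat) : Int) + (-1) * ((k+1 : Nat) : Int) = (m : Int) + (-1) * (k : Int)
      push_cast; ring
    rw [h2]
    rw [ih]
    simp [pvDesc]

theorem pvDesc_mem {n : Nat} {s : Int} (h : s ∈ pvDesc n) : 1 ≤ s ∧ s ≤ (n : Int) := by
  induction n with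
  | zero => simp [pvDesc] at h
  | succ m ih =>
    simp only [pvDesc, List.mem_cons] at h
    rcases h with h | h
    · subst h; constructor
      · omega
      · push_cast; omega
    · rcases ih h with ⟨h1, h2⟩
      constructor
      · exact h1
      · push_cast; omega

theorem insertBy_cons {α : Type} (before : α → α → Bool) (x y : α) (t : List α) :
    PySem.List.insertBy before x (y :: t) = if before x y then x :: y :: t else y :: PySem.List.insertBy before x t := rfl

theorem insertBy_append {α : Type} (before : α → α → Bool) (x : α) (ys zs : List α)
    (h : ∀ y ∈ ys, before x y = false) :
    PySem.List.insertBy before x (ys ++ zs) = ys ++ PySem.List.insertBy before x zs := by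
  induction ys with
  | nil => simp
  | cons y t ih =>
    have hy : before x y = false := h y (by simp)
    rw [List.cons_append, insertBy_cons, hy]
    simp only [Bool.false_eq_true, if_false, List.cons_append]
    rw [ih (fun y hy => h y (by simp [hy]))]

theorem insertBy_all_before {α : Type} (before : α → α → Bool) (x : α) (l : List α)
    (h : ∀ y ∈ l, before x y = true) :
    PySem.List.insertBy before x l = x :: l := by
  cases l with
  | nil => rfl
  | cons y t =>
    rw [insertBy_cons, h y (by simp)]
    simp

theorem sorted_rev_buckets (f : Int → Int) (n : Nat) (xs : List Int)
    (h : ∀ k ∈ xs, 1 ≤ f k ∧ f k ≤ (n : Int)) :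
    PySem.List.sorted xs f true
      = (pvDesc n).flatMap (fun s => xs.filter (fun k => f k == s)) := by
  induction xs using List.reverseRecOn with
  | nil => simp [PySem.List.sorted]
  | append_singleton xs x ih =>
    rw [PySem.List.sorted_rev_eq_foldl_insertBy, List.foldl_append, List.foldl_cons, List.foldl_nil,
      ← PySem.List.sorted_rev_eq_foldl_insertBy, ih (fun k hk => h k (by simp [hk]))]
    have hx := h x (by simp)
    clear ih h
    induction n with
    | zero => exfalso; omega
    | succ m ihn =>
      have hmem : ∀ y ∈ (pvDesc m).flatMap (fun s => xs.filter (fun k => f k == s)), f y ≤ (m : Int) := by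
        intro y hy
        rcases List.mem_flatMap.mp hy with ⟨s, hs, hyf⟩
        rcases List.mem_filter.mp hyf with ⟨_, hfy⟩
        have : f y = s := by simpa using hfy
        rw [this]; exact (pvDesc_mem hs).2
      simp only [pvDesc, List.flatMap_cons]
      by_cases hcase : f x = (m : Int) + 1
      · rw [insertBy_append _ _ _ _ (by
          intro y hy
          rcases List.mem_filter.mp hy with ⟨_, hfy⟩
          have hfy' : f y = (m : Int) + 1 := by simpa using hfy
          simp [hfy', hcase])]
        rw [insertBy_all_before _ _ _ (by
          intro y hy
          have := hmem y hy
          simp only [decide_eq_true_eq]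
          omega)]
        rw [List.filter_append]
        have hx1 : List.filter (fun k => f k == ((m:Int) + 1)) [x] = [x] := by simp [hcase]
        rw [hx1]
        have hcong : (pvDesc m).flatMap (fun s => (xs ++ [x]).filter (fun k => f k == s))
            = (pvDesc m).flatMap (fun s => xs.filter (fun k => f k == s)) := by
          apply List.flatMap_congr
          intro s hs
          rw [List.filter_append]
          have hsm := (pvDesc_mem hs).2
          have : (f x == s) = false := by
            simp only [beq_eq_false_iff_ne, ne_eq]
            omega
          simp [this]
        rw [hcong, List.append_assoc]
        rfl
      · have hxm : f x ≤ (m : Int) := by push_cast at hx ⊢; omega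
        rw [insertBy_append _ _ _ _ (by
          intro y hy
          rcases List.mem_filter.mp hy with ⟨_, hfy⟩
          have hfy' : f y = (m : Int) + 1 := by simpa using hfy
          simp only [decide_eq_false_iff_not]
          omega)]
        rw [ihn ⟨hx.1, hxm⟩]
        rw [List.filter_append]
        simp [hcase]

-- A's loop carrying (dict, next_comm) equals a plain insert-fold over enumerate
theorem fold_counter_eq_enumerate (color : Int → String) :
    ∀ (ks : List Int) (d : PySem.Dict Int String) (i : Int),
    (ks.foldl (fun (st : PySem.Dict Int String × Int) c => (st.1.insert c (color st.2), st.2 + 1)) (d, i)).1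
      = (PySem.List.enumerate ks i).foldl (fun d (p : Int × Int) => d.insert p.2 (color p.1)) d := by
  intro ks
  induction ks with
  | nil => intro d i; rfl
  | cons c t ih =>
    intro d i
    rw [List.foldl_cons, PySem.List.enumerate_cons, List.foldl_cons]
    exact ih (d.insert c (color i)) (i + 1)

-- items of a fresh-key insert-fold over enumerate, starting from empty
theorem items_fold_enumerate (color : Int → String) (L : List Int) (hnd : L.Nodup) :
    ((PySem.List.enumerate L 0).foldl (fun d (p : Int × Int) => d.insert p.2 (color p.1))
        (PySem.Dict.empty : PySem.Dict Int String)).items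
      = (PySem.List.enumerate L 0).map (fun p => (p.2, color p.1)) := by
  rw [PySem.Dict.items_foldl_insert_fresh (PySem.List.enumerate L 0) (fun p => p.2)
      (fun p => color p.1) PySem.Dict.empty
      (fun a _ => PySem.Dict.contains_empty a.2)
      (by rw [PySem.List.map_snd_enumerate]; exact hnd)]
  rfl

-- items of Dict.ofList over pairs with distinct keys is the list itself
theorem items_ofList_nodup {L : List (Int × String)} (hnd : (L.map (·.1)).Nodup) :
    (PySem.Dict.ofList L).items = L := by
  show (List.foldl (fun acc (p : Int × String) => acc.insert p.1 p.2) PySem.Dict.empty L).items = L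
  rw [PySem.Dict.items_foldl_insert_fresh L (fun p => p.1) (fun p => p.2) PySem.Dict.empty
      (fun a _ => PySem.Dict.contains_empty a.1) hnd]
  show [] ++ List.map (fun a => (a.1, a.2)) L = L
  simp

-- ===== VERDICT (by name: the statement is the Claim_ definition above) =====
theorem create_colormap_spec : Claim_equal_create_colormap := by
  intro cl idc _ _
  unfold Spec_create_colormap create_colormap create_colormap_alt
  dsimp only []
  set vals := (PySem.Dict.ofList idc).values with hvals
  set color : Int → String :=
    fun i => (PySem.List.pyGet? cl (PySem.Int.mod i ((cl.length : Nat) : Int))).getD "" with hcolor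
  have hsz : ((PySem.Dict.ofList idc).size : Int) = ((vals.length : Nat) : Int) := by
    simp [PySem.Dict.size, PySem.Dict.values, hvals]
  rw [← PySem.Dict.counter_eq_foldl, hsz]
  have hbounds : ∀ k ∈ PySem.Set.ofList vals,
      1 ≤ ((vals.count k : Nat) : Int) ∧ ((vals.count k : Nat) : Int) ≤ ((vals.length : Nat) : Int) := by
    intro k hk
    have hk' : k ∈ vals := (PySem.Set.mem_ofList vals k).mp hk
    have h1 : 0 < vals.count k := List.count_pos_iff.mpr hk'
    have h2 : vals.count k ≤ vals.length := List.count_le_length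
    constructor <;> [exact_mod_cast h1; exact_mod_cast h2]
  have hsorted := sorted_rev_buckets (fun k : Int => ((vals.count k : Nat) : Int)) vals.length
      (PySem.Set.ofList vals) hbounds
  have hLnd : ((pvDesc vals.length).flatMap
      (fun s => (PySem.Set.ofList vals).filter (fun k => ((vals.count k : Nat) : Int) == s))).Nodup := by
    rw [← hsorted]
    exact ((PySem.List.sorted_perm _ _ _).nodup_iff).mpr (PySem.Set.nodup_ofList vals)
  simp only [PySem.Dict.getD_counter, PySem.Dict.keys_counter, pyRange_desc]
  rw [hsorted]
  rw [fold_counter_eq_enumerate color _ PySem.Dict.empty 0,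
      items_fold_enumerate color _ hLnd,
      items_ofList_nodup
        (by rw [List.map_map]
            have h : ((fun p : Int × String => p.1) ∘ fun p : Int × Int => (p.2, color p.1))
                = fun p : Int × Int => p.2 := rfl
            rw [h, PySem.List.map_snd_enumerate]; exact hLnd)]
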